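-- pv_equiv track=rewrite | github.com/Niddish/RESCUE | config_neox.py | construct_3d_topology
-- ===== SOURCE A (Python) =====
-- def construct_3d_topology(parallel_settings, total_gpus=96):
--     """Construct a 3D topology representation."""
--     pipe_size = parallel_settings["pipe_parallel_size"]
--     model_size = parallel_settings["model_parallel_size"]
--     data_size = parallel_settings["data_parallel_size"]
--
--     topology = []
--     gpu_id = 0
--
--     for dp in range(data_size):
--         data_group = []
--         for pp in range(pipe_size):
--             pipe_group = []
--             for mp in range(model_size):
--                 pipe_group.append(f"GPU {gpu_id}")
--                 gpu_id += 1
--             data_group.append(pipe_group)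
--         topology.append(data_group)
--
--     return topology
-- ===== SOURCE B (Python) =====
-- def construct_3d_topology(parallel_settings, total_gpus=96):
--     """Construct a 3D topology representation."""
--     pipe_size = parallel_settings["pipe_parallel_size"]
--     model_size = parallel_settings["model_parallel_size"]
--     data_size = parallel_settings["data_parallel_size"]
--
--     flat = [f"GPU {i}" for i in range(data_size * pipe_size * model_size)]
--     return [
--         [
--             flat[(dp * pipe_size + pp) * model_size:(dp * pipe_size + pp) * model_size + model_size]
--             for pp in range(pipe_size)
--         ]
--         for dp in range(data_size)
--     ]
-- ===== Notes on version B (the rewrite author's own statement) =====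
-- stated objective: alternative
-- what changed: B builds the flat list of all GPU-id strings first and then reshapes it by slicing at computed offsets, instead of threading a mutable gpu_id counter through three nested appending loops.
import Mathlib
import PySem

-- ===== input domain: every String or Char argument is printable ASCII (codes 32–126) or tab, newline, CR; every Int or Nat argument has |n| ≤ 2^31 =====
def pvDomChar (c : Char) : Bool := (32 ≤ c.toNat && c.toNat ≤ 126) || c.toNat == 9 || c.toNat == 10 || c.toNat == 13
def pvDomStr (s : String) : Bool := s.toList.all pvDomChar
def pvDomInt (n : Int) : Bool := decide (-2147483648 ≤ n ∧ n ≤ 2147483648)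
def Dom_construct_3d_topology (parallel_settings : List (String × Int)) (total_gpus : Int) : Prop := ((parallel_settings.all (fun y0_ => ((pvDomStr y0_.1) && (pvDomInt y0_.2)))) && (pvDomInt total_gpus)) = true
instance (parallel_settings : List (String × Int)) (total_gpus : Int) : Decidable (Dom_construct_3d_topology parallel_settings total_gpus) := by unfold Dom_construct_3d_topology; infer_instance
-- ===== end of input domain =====

-- B builds the flat list of all GPU strings once and reshapes it by slicing, instead of
-- threading a gpu_id counter through three nested appending loops (objective: alternative).

-- ===== PORT A =====
def construct_3d_topology (parallel_settings : List (String × Int)) (total_gpus : Int) : List (List (List String)) :=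
  let d := PySem.Dict.mk parallel_settings
  let pipe_size := d.getD "pipe_parallel_size" 0
  let model_size := d.getD "model_parallel_size" 0
  let data_size := d.getD "data_parallel_size" 0
  let res := (PySem.List.pyRange 0 data_size 1).foldl (fun st _dp =>
      let inner := (PySem.List.pyRange 0 pipe_size 1).foldl (fun st2 _pp =>
          let pg := (PySem.List.pyRange 0 model_size 1).foldl (fun st3 _mp =>
              (st3.1 ++ ["GPU " ++ PySem.Int.toStr st3.2], st3.2 + 1)) (([] : List String), st2.2)
          (st2.1 ++ [pg.1], pg.2)) (([] : List (List String)), st.2)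
      (st.1 ++ [inner.1], inner.2)) (([] : List (List (List String))), (0 : Int))
  res.1

-- ===== PORT B =====
def construct_3d_topology_alt (parallel_settings : List (String × Int)) (total_gpus : Int) : List (List (List String)) :=
  let d := PySem.Dict.mk parallel_settings
  let pipe_size := d.getD "pipe_parallel_size" 0
  let model_size := d.getD "model_parallel_size" 0
  let data_size := d.getD "data_parallel_size" 0
  let flat := (PySem.List.pyRange 0 (data_size * pipe_size * model_size) 1).map
      (fun i => "GPU " ++ PySem.Int.toStr i)
  (PySem.List.pyRange 0 data_size 1).map (fun dp =>
    (PySem.List.pyRange 0 pipe_size 1).map (fun pp =>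
      PySem.List.slice flat (some ((dp * pipe_size + pp) * model_size))
        (some ((dp * pipe_size + pp) * model_size + model_size))))

-- ===== PRECONDITION & SPEC =====
-- Pre_ excludes exactly the dicts missing one of the three size keys, on which Python A raises KeyError.
def Pre_construct_3d_topology (parallel_settings : List (String × Int)) (total_gpus : Int) : Prop :=
  "pipe_parallel_size" ∈ parallel_settings.map Prod.fst ∧
  "model_parallel_size" ∈ parallel_settings.map Prod.fst ∧
  "data_parallel_size" ∈ parallel_settings.map Prod.fst
instance (parallel_settings : List (String × Int)) (total_gpus : Int) : Decidable (Pre_construct_3d_topology parallel_settings total_gpus) := by unfold Pre_construct_3d_topology; infer_instance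

def pvWitness_construct_3d_topology : (List (String × Int)) × Int :=
  ([("pipe_parallel_size", 2), ("model_parallel_size", 1), ("data_parallel_size", 2)], 96)

def Spec_construct_3d_topology (parallel_settings : List (String × Int)) (total_gpus : Int) (out : List (List (List String))) : Prop := out = construct_3d_topology_alt parallel_settings total_gpus
instance (parallel_settings : List (String × Int)) (total_gpus : Int) (out : List (List (List String))) : Decidable (Spec_construct_3d_topology parallel_settings total_gpus out) := by unfold Spec_construct_3d_topology; infer_instance

-- ===== CLAIM (what is proved, stated in full; the proofs are below) =====
def Claim_equal_construct_3d_topology : Prop := ∀ (parallel_settings : List (String × Int)) (total_gpus : Int), Dom_construct_3d_topology parallel_settings total_gpus → Pre_construct_3d_topology parallel_settings total_gpus → Spec_construct_3d_topology parallel_settings total_gpus (construct_3d_topology parallel_settings total_gpus)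

-- ===== LEMMAS AND PROOFS =====

def pvGpu (n : Int) : String := "GPU " ++ PySem.Int.toStr n

-- canonical form of the topology for loop counts D, P, M
def pvCanon (D P M : Nat) : List (List (List String)) :=
  (List.range D).map (fun dp => (List.range P).map (fun pp =>
    (List.range M).map (fun k : Nat => pvGpu (((dp * P + pp) * M + k : Nat) : Int))))

def pvBlock (M : Nat) (g : Int) : List String :=
  (List.range M).map (fun k : Nat => pvGpu (g + (k : Int)))

lemma block_succ (M : Nat) (g : Int) :
    pvBlock (M + 1) g = pvGpu g :: pvBlock M (g + 1) := by
  unfold pvBlock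
  rw [List.range_succ_eq_map]
  simp only [List.map_cons, List.map_map, Nat.cast_zero, add_zero]
  congr 1
  apply List.map_congr_left
  intro k _
  simp only [Function.comp_apply]
  congr 1
  push_cast
  ring

lemma foldlA1 (l : List Int) (acc : List String) (g : Int) :
    l.foldl (fun st3 _ => (st3.1 ++ ["GPU " ++ PySem.Int.toStr st3.2], st3.2 + 1)) (acc, g)
      = (acc ++ pvBlock l.length g, g + l.length) := by
  induction l generalizing acc g with
  | nil => simp [pvBlock]
  | cons x xs ih =>
    simp only [List.foldl_cons, ih, List.length_cons, block_succ]
    simp only [Prod.mk.injEq]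
    constructor
    · simp [pvGpu, List.append_assoc]
    · push_cast
      try ring

def pvBlock2 (P M : Nat) (g : Int) : List (List String) :=
  (List.range P).map (fun pp : Nat => pvBlock M (g + (pp : Int) * (M : Int)))

lemma block2_succ (P M : Nat) (g : Int) :
    pvBlock2 (P + 1) M g = pvBlock M g :: pvBlock2 P M (g + M) := by
  unfold pvBlock2
  rw [List.range_succ_eq_map]
  simp only [List.map_cons, List.map_map, Nat.cast_zero, zero_mul, add_zero]
  congr 1
  apply List.map_congr_left
  intro pp _
  simp only [Function.comp_apply]
  congr 1
  push_cast
  ring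

lemma foldlA2' (l : List Int) (M : Nat) (acc : List (List String)) (g : Int) :
    l.foldl (fun st2 (_ : Int) => (st2.1 ++ [pvBlock M st2.2], st2.2 + (M : Int))) (acc, g)
      = (acc ++ pvBlock2 l.length M g, g + l.length * M) := by
  induction l generalizing acc g with
  | nil => simp [pvBlock2]
  | cons x xs ih =>
    simp only [List.foldl_cons, ih, List.length_cons, block2_succ]
    simp only [Prod.mk.injEq]
    constructor
    · rw [List.append_assoc]
      simp
    · push_cast; ring

lemma foldlA2 (lm l : List Int) (acc : List (List String)) (g : Int) :
    l.foldl (fun st2 (_ : Int) =>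
        let pg := lm.foldl (fun st3 _ =>
            (st3.1 ++ ["GPU " ++ PySem.Int.toStr st3.2], st3.2 + 1)) (([] : List String), st2.2)
        (st2.1 ++ [pg.1], pg.2)) (acc, g)
      = (acc ++ pvBlock2 l.length lm.length g, g + l.length * lm.length) := by
  have hf : (fun (st2 : List (List String) × Int) (_ : Int) =>
        let pg := lm.foldl (fun st3 _ =>
            (st3.1 ++ ["GPU " ++ PySem.Int.toStr st3.2], st3.2 + 1)) (([] : List String), st2.2)
        (st2.1 ++ [pg.1], pg.2))
      = (fun (st2 : List (List String) × Int) (_ : Int) =>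
          (st2.1 ++ [pvBlock lm.length st2.2], st2.2 + (lm.length : Int))) := by
    funext st2 x
    simp only [foldlA1, List.nil_append]
  rw [hf, foldlA2']

def pvBlock3 (D P M : Nat) (g : Int) : List (List (List String)) :=
  (List.range D).map (fun dp : Nat => pvBlock2 P M (g + (dp : Int) * ((P : Int) * (M : Int))))

lemma block3_succ (D P M : Nat) (g : Int) :
    pvBlock3 (D + 1) P M g = pvBlock2 P M g :: pvBlock3 D P M (g + P * M) := by
  unfold pvBlock3
  rw [List.range_succ_eq_map]
  simp only [List.map_cons, List.map_map, Nat.cast_zero, zero_mul, add_zero]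
  congr 1
  apply List.map_congr_left
  intro dp _
  simp only [Function.comp_apply]
  congr 1
  push_cast
  ring

lemma foldlA3' (l : List Int) (P M : Nat) (acc : List (List (List String))) (g : Int) :
    l.foldl (fun st (_ : Int) => (st.1 ++ [pvBlock2 P M st.2], st.2 + (P : Int) * (M : Int))) (acc, g)
      = (acc ++ pvBlock3 l.length P M g, g + l.length * (P * M)) := by
  induction l generalizing acc g with
  | nil => simp [pvBlock3]
  | cons x xs ih =>
    simp only [List.foldl_cons, ih, List.length_cons, block3_succ]
    simp only [Prod.mk.injEq]
    constructor
    · rw [List.append_assoc]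
      simp
    · push_cast; ring

lemma foldlA3 (lm lp ld : List Int) (acc : List (List (List String))) (g : Int) :
    ld.foldl (fun st (_ : Int) =>
        let inner := lp.foldl (fun st2 (_ : Int) =>
            let pg := lm.foldl (fun st3 _ =>
                (st3.1 ++ ["GPU " ++ PySem.Int.toStr st3.2], st3.2 + 1)) (([] : List String), st2.2)
            (st2.1 ++ [pg.1], pg.2)) (([] : List (List String)), st.2)
        (st.1 ++ [inner.1], inner.2)) (acc, g)
      = (acc ++ pvBlock3 ld.length lp.length lm.length g, g + ld.length * (lp.length * lm.length)) := by
  have hf : (fun (st : List (List (List String)) × Int) (_ : Int) =>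
        let inner := lp.foldl (fun st2 (_ : Int) =>
            let pg := lm.foldl (fun st3 _ =>
                (st3.1 ++ ["GPU " ++ PySem.Int.toStr st3.2], st3.2 + 1)) (([] : List String), st2.2)
            (st2.1 ++ [pg.1], pg.2)) (([] : List (List String)), st.2)
        (st.1 ++ [inner.1], inner.2))
      = (fun (st : List (List (List String)) × Int) (_ : Int) =>
          (st.1 ++ [pvBlock2 lp.length lm.length st.2], st.2 + (lp.length : Int) * (lm.length : Int))) := by
    funext st x
    simp only [foldlA2, List.nil_append]
  rw [hf, foldlA3']

lemma block3_eq_canon (D P M : Nat) : pvBlock3 D P M 0 = pvCanon D P M := by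
  unfold pvBlock3 pvBlock2 pvBlock pvCanon
  apply List.map_congr_left; intro dp _
  apply List.map_congr_left; intro pp _
  apply List.map_congr_left; intro k _
  congr 1
  push_cast
  ring

lemma slice_nil {α : Type} (a b : Option Int) : PySem.List.slice ([] : List α) a b = [] := by
  cases hs : PySem.List.slice ([] : List α) a b with
  | nil => rfl
  | cons y ys =>
    have hy : y ∈ PySem.List.slice ([] : List α) a b := by rw [hs]; exact List.mem_cons_self
    have := PySem.List.mem_of_mem_slice _ a b hy
    simp at this

lemma slice_range_map (f : Nat → String) (N s m : Nat) (h : s + m ≤ N) :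
    PySem.List.slice ((List.range N).map f) (some (s : Int)) (some ((s : Int) + (m : Int)))
      = (List.range m).map (fun k : Nat => f (s + k)) := by
  rw [PySem.List.slice_natCast_add]
  apply List.ext_getElem
  · simp; omega
  · intro i h1 h2
    simp only [List.getElem_take, List.getElem_drop, List.getElem_map, List.getElem_range]

lemma core_eq (d p m : Int) :
    ((PySem.List.pyRange 0 d 1).foldl (fun st _dp =>
        let inner := (PySem.List.pyRange 0 p 1).foldl (fun st2 _pp =>
            let pg := (PySem.List.pyRange 0 m 1).foldl (fun st3 _mp =>
                (st3.1 ++ ["GPU " ++ PySem.Int.toStr st3.2], st3.2 + 1)) (([] : List String), st2.2)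
            (st2.1 ++ [pg.1], pg.2)) (([] : List (List String)), st.2)
        (st.1 ++ [inner.1], inner.2)) (([] : List (List (List String))), (0 : Int))).1
    = pvCanon d.toNat p.toNat m.toNat := by
  rw [foldlA3]
  simp only [PySem.List.length_pyRange_one, Int.sub_zero, List.nil_append]
  exact block3_eq_canon _ _ _

lemma alt_core_eq (d p m : Int) :
    ((PySem.List.pyRange 0 d 1).map (fun dp =>
      (PySem.List.pyRange 0 p 1).map (fun pp =>
        PySem.List.slice
          ((PySem.List.pyRange 0 (d * p * m) 1).map (fun i => "GPU " ++ PySem.Int.toStr i))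
          (some ((dp * p + pp) * m)) (some ((dp * p + pp) * m + m)))))
    = pvCanon d.toNat p.toNat m.toNat := by
  by_cases hd : d ≤ 0
  · rw [PySem.List.pyRange_one_eq_nil (a := (0:Int)) (b := d) (by omega)]
    unfold pvCanon
    rw [(by omega : d.toNat = 0)]
    simp
  push_neg at hd
  by_cases hp : p ≤ 0
  · unfold pvCanon
    rw [PySem.List.pyRange_one_eq_nil (a := (0:Int)) (b := p) (by omega),
        (by omega : p.toNat = 0)]
    simp
  push_neg at hp
  by_cases hm : m ≤ 0
  · have hN : d * p * m ≤ 0 :=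
      mul_nonpos_of_nonneg_of_nonpos (by positivity) hm
    rw [PySem.List.pyRange_one_eq_nil (a := (0:Int)) (b := d * p * m) (by omega)]
    unfold pvCanon
    rw [(by omega : m.toNat = 0)]
    simp [slice_nil]
  push_neg at hm
  -- main case: all three sizes positive
  have hN : (d * p * m) = ((d.toNat * p.toNat * m.toNat : Nat) : Int) := by
    push_cast [Int.toNat_of_nonneg hd.le, Int.toNat_of_nonneg hp.le, Int.toNat_of_nonneg hm.le]
    try ring
  rw [hN, PySem.List.pyRange_one, PySem.List.pyRange_one, PySem.List.pyRange_one]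
  simp only [Int.sub_zero, Int.toNat_natCast, List.map_map]
  unfold pvCanon
  apply List.map_congr_left; intro dp hdp
  apply List.map_congr_left; intro pp hpp
  simp only [Function.comp_apply, zero_add]
  rw [List.mem_range] at hdp hpp
  have hs : ((dp : Int) * p + (pp : Int)) * m = (((dp * p.toNat + pp) * m.toNat : Nat) : Int) := by
    push_cast [Int.toNat_of_nonneg hp.le, Int.toNat_of_nonneg hm.le]; ring
  have hsm : ((dp : Int) * p + (pp : Int)) * m + m
      = ((((dp * p.toNat + pp) * m.toNat : Nat) : Int) + ((m.toNat : Nat) : Int)) := by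
    push_cast [Int.toNat_of_nonneg hp.le, Int.toNat_of_nonneg hm.le]; ring
  have hb : (dp * p.toNat + pp) * m.toNat + m.toNat ≤ d.toNat * p.toNat * m.toNat := by
    have h1 : dp * p.toNat + pp + 1 ≤ d.toNat * p.toNat := by nlinarith
    nlinarith
  rw [hsm, hs, slice_range_map _ _ _ _ hb]
  simp only [Function.comp_apply]
  apply List.map_congr_left; intro k _
  unfold pvGpu
  try congr 2
  try push_cast
  try ring

-- ===== VERDICT (by name: the statement is the Claim_ definition above) =====
theorem construct_3d_topology_spec : Claim_equal_construct_3d_topology := by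
  intro ps t _ _
  unfold Spec_construct_3d_topology construct_3d_topology construct_3d_topology_alt
  rw [core_eq, alt_core_eq]
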